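-- pv_equiv track=rewrite | github.com/Samoy/question-daily | 2024/06/22.py | smallestBeautifulString
-- ===== SOURCE A (Python) =====
-- def smallestBeautifulString(s: str, k: int) -> str:
--     a = ord('a')
--     k += a
--     s = list(map(ord, s))
--     n = len(s)
--     i = n - 1  # 从最后一个字母开始
--     s[i] += 1  # 先加一
--     while i < n:
--         if s[i] == k:  # 需要进位
--             if i == 0:  # 无法进位
--                 return ""
--             # 进位
--             s[i] = a
--             i -= 1
--             s[i] += 1
--         elif i and s[i] == s[i - 1] or i > 1 and s[i] == s[i - 2]:
--             s[i] += 1  # 如果 s[i] 和左侧的字符形成回文串，就继续增加 s[i]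
--         else:
--             i += 1  # 反过来检查后面是否有回文串
--     return ''.join(map(chr, s))
-- ===== SOURCE B (Python) =====
-- def smallestBeautifulString(s: str, k: int) -> str:
--     a = ord('a')
--     K = k + a
--     t = list(map(ord, s))
--     n = len(t)
--     i = n - 1
--     t[i] += 1
--     # phase 1: backward carry/fix loop, stops at the leftmost changed position
--     while True:
--         if t[i] == K:
--             if i == 0:
--                 return ""
--             t[i] = a
--             i -= 1
--             t[i] += 1
--         elif (i and t[i] == t[i - 1]) or (i > 1 and t[i] == t[i - 2]):
--             t[i] += 1
--         else:
--             break
--     # phase 2: forward fill, smallest non-palindromic character at each slot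
--     for j in range(i + 1, n):
--         for c in range(a, K):
--             if c != t[j - 1] and (j < 2 or c != t[j - 2]):
--                 t[j] = c
--                 break
--     return ''.join(map(chr, t))
-- ===== Notes on version B (the rewrite author's own statement) =====
-- stated objective: alternative
-- what changed: A runs one three-way while-loop whose index walks left on carries and then re-walks right re-testing and re-incrementing every suffix position; B splits the work into a backward carry/fix loop that stops at the leftmost changed position and a forward pass that directly writes the smallest character differing from the two left neighbours into each remaining slot (valid since k>=3 guarantees such a character).
-- outside the precondition, e.g. on smallestBeautifulString('aba', 2): A returns '', B returns 'baa'; on smallestBeautifulString('aba', 1): A does not finish within the time limit, B returns 'aca'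
import Mathlib
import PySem

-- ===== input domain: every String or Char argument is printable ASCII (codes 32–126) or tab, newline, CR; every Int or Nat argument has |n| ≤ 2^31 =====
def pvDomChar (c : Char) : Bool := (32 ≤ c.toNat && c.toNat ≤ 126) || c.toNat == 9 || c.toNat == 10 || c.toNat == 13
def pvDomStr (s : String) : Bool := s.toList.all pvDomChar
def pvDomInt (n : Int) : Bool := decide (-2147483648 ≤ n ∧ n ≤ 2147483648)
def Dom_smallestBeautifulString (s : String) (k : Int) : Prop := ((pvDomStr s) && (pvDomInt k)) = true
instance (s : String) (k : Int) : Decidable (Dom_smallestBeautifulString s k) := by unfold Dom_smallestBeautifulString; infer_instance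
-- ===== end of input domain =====

-- B replaces A's single left-and-right-walking while-loop by a backward carry/fix loop plus a
-- direct forward smallest-valid-character fill (objective: alternative decomposition, not faster).

-- ===== PORT A =====
-- ''.join(map(chr, s)) on the list of ordinals
def joinOrds (t : List Int) : String := String.mk (t.map (fun v => Char.ofNat v.toNat))

-- A's while-loop, one fuel unit per iteration.  The fuel argument is only a totality guard:
-- under Pre_ the initial fuel 6*n+6 is never exhausted (proved below).
def aLoop (k : Int) (n : Nat) (fuel : Nat) (t : List Int) (i : Nat) : String :=
  match fuel with
  | 0 => ""
  | f + 1 =>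
    if i < n then
      if t.getD i 0 = k then
        if i = 0 then ""
        else aLoop k n f ((t.set i 97).set (i-1) (t.getD (i-1) 0 + 1)) (i-1)
      else if ((decide (i ≠ 0) && decide (t.getD i 0 = t.getD (i-1) 0)) ||
               (decide (1 < i) && decide (t.getD i 0 = t.getD (i-2) 0))) then
        aLoop k n f (t.set i (t.getD i 0 + 1)) i
      else aLoop k n f t (i+1)
    else joinOrds t

def smallestBeautifulString (s : String) (k : Int) : String :=
  let t := s.toList.map (fun c => (c.toNat : Int))
  let n := t.length
  if n = 0 then ""  -- Python raises IndexError here (s[-1] on []); outside Pre_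
  else aLoop (k + 97) n (6*n + 6) (t.set (n-1) (t.getD (n-1) 0 + 1)) (n-1)

-- ===== PORT B =====
-- B's phase-1 backward loop; 'none' is the "" return (carry fell off the left end).
-- The fuel argument is only a totality guard: 3*n+3 is never exhausted under Pre_ (proved below).
def bBack (K : Int) (fuel : Nat) (t : List Int) (i : Nat) : Option (List Int × Nat) :=
  match fuel with
  | 0 => none
  | f + 1 =>
    if t.getD i 0 = K then
      if i = 0 then none
      else bBack K f ((t.set i 97).set (i-1) (t.getD (i-1) 0 + 1)) (i-1)
    else if ((decide (i ≠ 0) && decide (t.getD i 0 = t.getD (i-1) 0)) ||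
             (decide (1 < i) && decide (t.getD i 0 = t.getD (i-2) 0))) then
      bBack K f (t.set i (t.getD i 0 + 1)) i
    else some (t, i)

-- 'for c in range(a, K): if …: break' — first valid character, cnt = (K-a) candidates
def bFind (t : List Int) (j : Nat) (c : Int) (cnt : Nat) : Option Int :=
  match cnt with
  | 0 => none
  | m + 1 =>
    if c ≠ t.getD (j-1) 0 ∧ (j < 2 ∨ c ≠ t.getD (j-2) 0) then some c
    else bFind t j (c+1) m

-- B's phase-2 forward fill over j = i+1 … n-1
def bFill (K : Int) (t : List Int) (j n : Nat) : List Int :=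
  if j < n then
    bFill K (match bFind t j 97 (K - 97).toNat with
             | some c => t.set j c
             | none => t) (j+1) n
  else t
termination_by n - j
decreasing_by omega

def smallestBeautifulString_alt (s : String) (k : Int) : String :=
  let t := s.toList.map (fun c => (c.toNat : Int))
  let n := t.length
  if n = 0 then ""  -- Python raises IndexError here (t[-1] on []); outside Pre_
  else
    match bBack (k + 97) (3*n + 3) (t.set (n-1) (t.getD (n-1) 0 + 1)) (n-1) with
    | none => ""
    | some (t', i) => joinOrds (bFill (k + 97) t' (i+1) n)

-- ===== PRECONDITION & SPEC =====
-- ordinal of character j of s (0 outside the string), as both programs see it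
def ordAt (s : String) (j : Nat) : Int := (s.toList.map (fun c => (c.toNat : Int))).getD j 0

-- for any k: incrementing the last character already gives no carry and no short palindrome,
-- so both programs stop immediately with the same string
def QuickBreak (s : String) (k : Int) : Prop :=
  ordAt s (s.toList.length - 1) + 1 ≠ k + 97 ∧
  (s.toList.length = 1 ∨
    (ordAt s (s.toList.length - 1) + 1 ≠ ordAt s (s.toList.length - 2) ∧
     (s.toList.length ≤ 2 ∨ ordAt s (s.toList.length - 1) + 1 ≠ ordAt s (s.toList.length - 3))))

-- Pre_ excludes the empty string, on which A raises IndexError, and — unless the input is a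
-- QuickBreak case, where both programs trivially agree — k < 3, below the problem's guaranteed
-- alphabet size (the LeetCode statement has 4 ≤ k ≤ 26): with fewer than 3 letters a
-- palindrome-free fill need not exist, A's forward pass can carry back left, and its returned
-- strings there (or divergence, e.g. on ("aba", 1)) are accidents of its loop.
def Pre_smallestBeautifulString (s : String) (k : Int) : Prop :=
  s ≠ "" ∧ (3 ≤ k ∨ QuickBreak s k)
instance (s : String) (k : Int) : Decidable (Pre_smallestBeautifulString s k) := by
  unfold Pre_smallestBeautifulString; unfold QuickBreak; infer_instance

def pvWitness_smallestBeautifulString : String × Int := ("abc", 4)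

def Spec_smallestBeautifulString (s : String) (k : Int) (out : String) : Prop := out = smallestBeautifulString_alt s k
instance (s : String) (k : Int) (out : String) : Decidable (Spec_smallestBeautifulString s k out) := by unfold Spec_smallestBeautifulString; infer_instance

-- ===== CLAIM (what is proved, stated in full; the proofs are below) =====
def Claim_equal_smallestBeautifulString : Prop := ∀ (s : String) (k : Int), Dom_smallestBeautifulString s k → Pre_smallestBeautifulString s k → Spec_smallestBeautifulString s k (smallestBeautifulString s k)

-- ===== LEMMAS AND PROOFS =====

-- the palindrome test of both loops, as a function of the candidate value v at slot i
def palV (t : List Int) (i : Nat) (v : Int) : Bool :=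
  (decide (i ≠ 0) && decide (v = t.getD (i-1) 0)) ||
  (decide (1 < i) && decide (v = t.getD (i-2) 0))

-- increments still needed at slot i before the palindrome test fails (always ≤ 2)
def escN (t : List Int) (i : Nat) : Nat :=
  if palV t i (t.getD i 0) then (if palV t i (t.getD i 0 + 1) then 2 else 1) else 0

lemma getD_set_ne (t : List Int) (j l : Nat) (v : Int) (h : l ≠ j) :
    (t.set j v).getD l 0 = t.getD l 0 := by
  simp [List.getD, List.getElem?_set_ne (Ne.symm h)]

lemma getD_set_eq (t : List Int) (j : Nat) (v : Int) (h : j < t.length) :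
    (t.set j v).getD j 0 = v := by
  simp [List.getD, h]

lemma set_getD_self (t : List Int) (j : Nat) (h : j < t.length) :
    t.set j (t.getD j 0) = t := by
  apply List.ext_getElem
  · simp
  · intro l hl _
    rcases eq_or_ne l j with rfl | hne
    · simp [List.getD, List.getElem?_eq_getElem h]
    · simp [List.getElem_set_ne (Ne.symm hne)]

lemma palV_set (t : List Int) (i : Nat) (w v : Int) (hi : 1 ≤ i) :
    palV (t.set i w) i v = palV t i v := by
  unfold palV
  rw [getD_set_ne t i (i-1) w (by omega), getD_set_ne t i (i-2) w (by omega)]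

lemma palV_pos (t : List Int) (i : Nat) (v : Int) (h : palV t i v = true) : 1 ≤ i := by
  simp only [palV, Bool.or_eq_true, Bool.and_eq_true, decide_eq_true_eq] at h
  omega

-- among v, v+1, v+2 at least one fails the palindrome test
lemma palV_escape (t : List Int) (i : Nat) (v : Int)
    (h1 : palV t i v = true) (h2 : palV t i (v+1) = true) : palV t i (v+2) = false := by
  rw [Bool.eq_false_iff]
  intro h3
  simp only [palV, Bool.or_eq_true, Bool.and_eq_true, decide_eq_true_eq] at h1 h2 h3
  omega

lemma escN_le_two (t : List Int) (i : Nat) : escN t i ≤ 2 := by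
  unfold escN; split_ifs <;> omega

lemma escN_set_incr (t : List Int) (i : Nat) (hi : 1 ≤ i) (hlen : i < t.length)
    (hp : palV t i (t.getD i 0) = true) :
    escN (t.set i (t.getD i 0 + 1)) i + 1 = escN t i := by
  unfold escN
  rw [getD_set_eq t i _ hlen, palV_set t i _ _ hi, palV_set t i _ _ hi, if_pos hp]
  by_cases h2 : palV t i (t.getD i 0 + 1) = true
  · have h3 := palV_escape t i (t.getD i 0) hp h2
    have : t.getD i 0 + 1 + 1 = t.getD i 0 + 2 := by ring
    rw [if_pos h2, if_pos h2, this, h3]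
    simp
  · rw [if_neg h2, if_neg h2]

-- the bFind condition is the negation of the palindrome test (for j ≥ 1)
lemma palV_true_not_find (t : List Int) (j : Nat) (v : Int) (_hj : 1 ≤ j)
    (h : palV t j v = true) :
    ¬ (v ≠ t.getD (j-1) 0 ∧ (j < 2 ∨ v ≠ t.getD (j-2) 0)) := by
  simp only [palV, Bool.or_eq_true, Bool.and_eq_true, decide_eq_true_eq] at h
  rcases h with ⟨_, h⟩ | ⟨h1, h⟩
  · intro hcon; exact hcon.1 h
  · intro hcon; rcases hcon.2 with h2 | h2
    · omega
    · exact h2 h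

lemma palV_false_find (t : List Int) (j : Nat) (v : Int) (hj : 1 ≤ j)
    (h : palV t j v = false) :
    v ≠ t.getD (j-1) 0 ∧ (j < 2 ∨ v ≠ t.getD (j-2) 0) := by
  have h' : ¬ (palV t j v = true) := by simp [h]
  simp only [palV, Bool.or_eq_true, Bool.and_eq_true, decide_eq_true_eq, not_or,
    not_and] at h'
  obtain ⟨h1, h2⟩ := h'
  refine ⟨h1 (by omega), ?_⟩
  by_cases hj2 : j < 2
  · exact Or.inl hj2
  · exact Or.inr (h2 (by omega))

-- ===== forward phase: from an all-'a' suffix, A's loop computes B's fill =====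
lemma fwd (K : Int) (n : Nat) (hK : 100 ≤ K) :
    ∀ (m : Nat) (t : List Int) (j f : Nat), n = t.length → j + m = n → 1 ≤ j →
      (∀ l, j ≤ l → l < n → t.getD l 0 = 97) →
      3*m + 1 ≤ f →
      aLoop K n f t j = joinOrds (bFill K t j n) := by
  intro m
  induction m with
  | zero =>
    intro t j f hlen hjm hj hsuf hf
    obtain ⟨f, rfl⟩ : ∃ f', f = f' + 1 := ⟨f - 1, by omega⟩
    rw [aLoop, bFill, if_neg (by omega : ¬ j < n), if_neg (by omega : ¬ j < n)]
  | succ m ih =>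
    intro t j f hlen hjm hj hsuf hf
    obtain ⟨f, rfl⟩ : ∃ f', f = f' + 1 := ⟨f - 1, by omega⟩
    have hjn : j < n := by omega
    have hjlen : j < t.length := by omega
    have hv : t.getD j 0 = 97 := hsuf j (le_refl j) hjn
    obtain ⟨cnt, hcnt⟩ : ∃ c, (K - 97).toNat = c + 3 := ⟨(K - 97).toNat - 3, by omega⟩
    have hA : (97:Int) + 1 = 98 := by norm_num
    have hB : (98:Int) + 1 = 99 := by norm_num
    have hc1 : ((decide (j ≠ 0) && decide ((97:Int) = t.getD (j-1) 0)) ||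
        (decide (1 < j) && decide ((97:Int) = t.getD (j-2) 0))) = palV t j 97 := rfl
    rw [aLoop, if_pos hjn, bFill, if_pos hjn, hcnt, hv, if_neg (by omega : ¬ (97:Int) = K), hc1]
    by_cases hp0 : palV t j 97 = true
    · -- 'a' collides; try 'b'
      have hnf0 := palV_true_not_find t j 97 hj hp0
      rw [hp0, if_pos rfl, hA]
      set t1 := t.set j 98 with ht1
      have hlen1 : n = t1.length := by simp [ht1, hlen]
      have hget1 : t1.getD j 0 = 98 := getD_set_eq t j 98 hjlen
      have hpal1 : ∀ v, palV t1 j v = palV t j v := fun v => palV_set t j 98 v hj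
      have hc2 : ((decide (j ≠ 0) && decide ((98:Int) = t1.getD (j-1) 0)) ||
          (decide (1 < j) && decide ((98:Int) = t1.getD (j-2) 0))) = palV t1 j 98 := rfl
      obtain ⟨f, rfl⟩ : ∃ f', f = f' + 1 := ⟨f - 1, by omega⟩
      rw [aLoop, if_pos hjn, hget1, if_neg (by omega : ¬ (98:Int) = K), hc2, hpal1]
      by_cases hp1 : palV t j 98 = true
      · -- 'b' collides too; 'c' is free
        have hnf1 := palV_true_not_find t j 98 hj hp1
        have hp2 : palV t j 99 = false := by
          have h := palV_escape t j 97 hp0 (by rw [hA]; exact hp1)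
          rw [show (97:Int) + 2 = 99 by norm_num] at h
          exact h
        have hf2 := palV_false_find t j 99 hj hp2
        have hbf : bFind t j 97 (cnt + 3) = some 99 := by
          rw [bFind, if_neg hnf0, hA, bFind, if_neg hnf1, hB, bFind, if_pos hf2]
        rw [hp1, if_pos rfl, hB]
        have hset2 : t1.set j 99 = t.set j 99 := by rw [ht1, List.set_set]
        rw [hset2]
        set t2 := t.set j 99 with ht2
        have hlen2 : n = t2.length := by simp [ht2, hlen]
        have hget2 : t2.getD j 0 = 99 := getD_set_eq t j 99 hjlen
        have hpal2 : ∀ v, palV t2 j v = palV t j v := fun v => palV_set t j 99 v hj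
        have hc3 : ((decide (j ≠ 0) && decide ((99:Int) = t2.getD (j-1) 0)) ||
            (decide (1 < j) && decide ((99:Int) = t2.getD (j-2) 0))) = palV t2 j 99 := rfl
        obtain ⟨f, rfl⟩ : ∃ f', f = f' + 1 := ⟨f - 1, by omega⟩
        rw [aLoop, if_pos hjn, hget2, if_neg (by omega : ¬ (99:Int) = K), hc3, hpal2, hp2,
          if_neg (by simp), hbf]
        simp only []
        exact ih t2 (j+1) f hlen2 (by omega) (by omega)
          (fun l hl1 hl2 => by rw [ht2, getD_set_ne t j l 99 (by omega)]; exact hsuf l (by omega) hl2)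
          (by omega)
      · -- 'b' is free
        have hp1' : palV t j 98 = false := Bool.eq_false_iff.mpr hp1
        have hf1 := palV_false_find t j 98 hj hp1'
        have hbf : bFind t j 97 (cnt + 3) = some 98 := by
          rw [bFind, if_neg hnf0, hA, bFind, if_pos hf1]
        rw [hp1', if_neg (by simp), hbf]
        simp only []
        exact ih t1 (j+1) f hlen1 (by omega) (by omega)
          (fun l hl1 hl2 => by rw [ht1, getD_set_ne t j l 98 (by omega)]; exact hsuf l (by omega) hl2)
          (by omega)
    · -- 'a' is free: A advances without writing, B writes back the same 'a'
      have hp0' : palV t j 97 = false := Bool.eq_false_iff.mpr hp0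
      have hf0 := palV_false_find t j 97 hj hp0'
      have hbf : bFind t j 97 (cnt + 3) = some 97 := by
        rw [bFind, if_pos hf0]
      rw [hp0', if_neg (by simp), hbf]
      simp only []
      have hset : t.set j 97 = t := by rw [← hv]; exact set_getD_self t j hjlen
      rw [hset]
      exact ih t (j+1) f hlen (by omega) (by omega)
        (fun l hl1 hl2 => hsuf l (by omega) hl2) (by omega)

-- ===== backward phase: both loops step in lockstep until break / "" =====
lemma back (K : Int) (n : Nat) (hK : 100 ≤ K) :
    ∀ (fb : Nat) (t : List Int) (i fa : Nat), n = t.length → i < n →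
      (∀ l, i < l → l < n → t.getD l 0 = 97) →
      3*i + escN t i + 1 ≤ fb →
      3*i + escN t i + 1 + (3*n + 1) ≤ fa →
      aLoop K n fa t i =
        (match bBack K fb t i with
         | none => ""
         | some (t', i') => joinOrds (bFill K t' (i'+1) n)) := by
  intro fb
  induction fb with
  | zero => intro t i fa _ _ _ hfb _; omega
  | succ fb ih =>
    intro t i fa hlen hi hsuf hfb hfa
    obtain ⟨fa, rfl⟩ : ∃ f', fa = f' + 1 := ⟨fa - 1, by omega⟩
    have hilen : i < t.length := by omega
    rw [aLoop, bBack, if_pos hi]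
    by_cases hc : t.getD i 0 = K
    · rw [if_pos hc, if_pos hc]
      by_cases hz : i = 0
      · rw [if_pos hz, if_pos hz]
      · rw [if_neg hz, if_neg hz]
        have hi1 : 1 ≤ i := by omega
        set t2 := (t.set i 97).set (i-1) (t.getD (i-1) 0 + 1) with ht2
        have hlen2 : n = t2.length := by simp [ht2, hlen]
        have hsuf2 : ∀ l, i - 1 < l → l < n → t2.getD l 0 = 97 := by
          intro l hl1 hl2
          rcases eq_or_ne l i with rfl | hne
          · rw [ht2, getD_set_ne _ _ _ _ (by omega), getD_set_eq _ _ _ hilen]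
          · rw [ht2, getD_set_ne _ _ _ _ (by omega), getD_set_ne _ _ _ _ hne]
            exact hsuf l (by omega) hl2
        have he2 := escN_le_two t2 (i-1)
        exact ih t2 (i-1) fa hlen2 (by omega) hsuf2 (by omega) (by omega)
    · rw [if_neg hc, if_neg hc]
      have hcond : ((decide (i ≠ 0) && decide (t.getD i 0 = t.getD (i-1) 0)) ||
          (decide (1 < i) && decide (t.getD i 0 = t.getD (i-2) 0))) = palV t i (t.getD i 0) := rfl
      rw [hcond]
      by_cases hp : palV t i (t.getD i 0) = true
      · rw [hp, if_pos rfl, if_pos rfl]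
        have hi1 : 1 ≤ i := palV_pos t i _ hp
        have hesc := escN_set_incr t i hi1 hilen hp
        set t1 := t.set i (t.getD i 0 + 1) with ht1
        have hlen1 : n = t1.length := by simp [ht1, hlen]
        have hsuf1 : ∀ l, i < l → l < n → t1.getD l 0 = 97 := by
          intro l hl1 hl2
          rw [ht1, getD_set_ne _ _ _ _ (by omega)]
          exact hsuf l hl1 hl2
        exact ih t1 i fa hlen1 hi hsuf1 (by omega) (by omega)
      · rw [Bool.eq_false_iff.mpr hp, if_neg (by simp), if_neg (by simp)]
        exact fwd K n hK (n - (i+1)) t (i+1) fa hlen (by omega) (by omega)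
          (fun l hl1 hl2 => hsuf l (by omega) hl2) (by omega)

lemma glue (K : Int) (L : List Int) (hK : 100 ≤ K) (hne : L ≠ []) :
    (let n := L.length;
     if n = 0 then "" else aLoop K n (6*n + 6) (L.set (n-1) (L.getD (n-1) 0 + 1)) (n-1))
  = (let n := L.length;
     if n = 0 then ""
     else match bBack K (3*n + 3) (L.set (n-1) (L.getD (n-1) 0 + 1)) (n-1) with
          | none => ""
          | some (t', i) => joinOrds (bFill K t' (i+1) n)) := by
  have hn : L.length ≠ 0 := by simpa [List.length_eq_zero_iff] using hne
  simp only [if_neg hn]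
  set t0 := L.set (L.length - 1) (L.getD (L.length - 1) 0 + 1) with ht0
  have hlen : L.length = t0.length := by simp [ht0]
  have he := escN_le_two t0 (L.length - 1)
  exact back K L.length hK (3*L.length + 3) t0 (L.length - 1) (6*L.length + 6) hlen
    (by omega) (fun l hl1 hl2 => by omega) (by omega) (by omega)

lemma quick (K : Int) (L : List Int) (hne : L ≠ [])
    (hc : L.getD (L.length - 1) 0 + 1 ≠ K)
    (hp : L.length = 1 ∨
      (L.getD (L.length - 1) 0 + 1 ≠ L.getD (L.length - 2) 0 ∧
       (L.length ≤ 2 ∨ L.getD (L.length - 1) 0 + 1 ≠ L.getD (L.length - 3) 0))) :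
    (let n := L.length;
     if n = 0 then "" else aLoop K n (6*n + 6) (L.set (n-1) (L.getD (n-1) 0 + 1)) (n-1))
  = (let n := L.length;
     if n = 0 then ""
     else match bBack K (3*n + 3) (L.set (n-1) (L.getD (n-1) 0 + 1)) (n-1) with
          | none => ""
          | some (t', i) => joinOrds (bFill K t' (i+1) n)) := by
  have hn : L.length ≠ 0 := by simpa [List.length_eq_zero_iff] using hne
  simp only [if_neg hn]
  set n := L.length with hnn
  set c := L.getD (n-1) 0 + 1 with hcc
  set t0 := L.set (n-1) c with ht0
  have hget : t0.getD (n-1) 0 = c := getD_set_eq L (n-1) c (by omega)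
  have hpal : palV t0 (n-1) c = false := by
    rw [Bool.eq_false_iff]
    intro h
    simp only [palV, Bool.or_eq_true, Bool.and_eq_true, decide_eq_true_eq] at h
    rcases h with ⟨h1, h2⟩ | ⟨h1, h2⟩
    · -- c = t0[n-2]; so n ≥ 2 and t0[n-2] = L[n-2]
      have hn2 : 2 ≤ n := by omega
      rw [ht0, getD_set_ne L (n-1) (n-1-1) c (by omega)] at h2
      rcases hp with h | ⟨h3, _⟩
      · omega
      · exact h3 (by rw [show n - 2 = n - 1 - 1 by omega]; exact h2)
    · -- c = t0[n-3]; so n ≥ 3 and t0[n-3] = L[n-3]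
      have hn3 : 3 ≤ n := by omega
      rw [ht0, getD_set_ne L (n-1) (n-1-2) c (by omega)] at h2
      rcases hp with h | ⟨_, h3 | h3⟩
      · omega
      · omega
      · exact h3 (by rw [show n - 3 = n - 1 - 2 by omega]; exact h2)
  have hcond : ((decide (n-1 ≠ 0) && decide (t0.getD (n-1) 0 = t0.getD (n-1-1) 0)) ||
      (decide (1 < n-1) && decide (t0.getD (n-1) 0 = t0.getD (n-1-2) 0))) =
      palV t0 (n-1) (t0.getD (n-1) 0) := rfl
  obtain ⟨f, hf⟩ : ∃ f, 6*n + 6 = f + 1 := ⟨6*n + 5, by omega⟩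
  obtain ⟨f', hf'⟩ : ∃ f', f = f' + 1 := ⟨f - 1, by omega⟩
  obtain ⟨g, hg⟩ : ∃ g, 3*n + 3 = g + 1 := ⟨3*n + 2, by omega⟩
  have hL : aLoop K n (6*n + 6) t0 (n-1) = joinOrds t0 := by
    rw [hf, aLoop, if_pos (by omega : n - 1 < n), hcond, hget, if_neg hc, hpal,
      if_neg (by simp), show n - 1 + 1 = n by omega, hf', aLoop, if_neg (by omega : ¬ n < n)]
  have hR : bBack K (3*n + 3) t0 (n-1) = some (t0, n-1) := by
    rw [hg, bBack, hcond, hget, if_neg hc, hpal, if_neg (by simp)]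
  rw [hL, hR]
  show joinOrds t0 = joinOrds (bFill K t0 (n - 1 + 1) n)
  rw [show n - 1 + 1 = n by omega, bFill, if_neg (by omega : ¬ n < n)]

-- ===== VERDICT (by name: the statement is the Claim_ definition above) =====
theorem smallestBeautifulString_spec : Claim_equal_smallestBeautifulString := by
  intro s k _hDom hPre
  obtain ⟨hs, hk⟩ := hPre
  have hs' : s.toList ≠ [] := fun h => hs (String.toList_eq_nil_iff.mp h)
  have hne : s.toList.map (fun c => (c.toNat : Int)) ≠ [] := by
    simpa [List.map_eq_nil_iff] using hs'
  rcases hk with hk | hq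
  · exact glue (k + 97) (s.toList.map (fun c => (c.toNat : Int))) (by omega) hne
  · obtain ⟨hc, hp⟩ := hq
    refine quick (k + 97) (s.toList.map (fun c => (c.toNat : Int))) hne ?_ ?_
    · simp only [List.length_map]; exact hc
    · simp only [List.length_map]; exact hp
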